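-- pv_equiv track=rewrite | github.com/knutae/adventofcode | 2021/19/solve.py | rot3
-- ===== SOURCE A (Python) =====
-- def rot2(y,z):
--     yield y,z
--     yield -z,y
--     yield -y,-z
--     yield z,-y
--
-- def rot3(x,y,z):
--     # X positive: x,y,z
--     for a,b in rot2(y,z):
--         yield x,a,b
--     # X negative: -x,-y,z
--     for a,b in rot2(-y,z):
--         yield -x,a,b
--     # Y positive: y,-x,z
--     for a,b in rot2(-x,z):
--         yield y,a,b
--     # Y negative: -y,x,z
--     for a,b in rot2(x,z):
--         yield -y,a,b
--     # Z positive: z,y,-x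
--     for a,b in rot2(y,-x):
--         yield z,a,b
--     # Z negative: -z,y,x
--     for a,b in rot2(y,x):
--         yield -z,a,b
-- ===== SOURCE B (Python) =====
-- # All 24 orientations precomputed as a flat sign/axis-index table; one pass applies each.
-- _TABLE = [
--     (1,0, 1,1, 1,2), (1,0,-1,2, 1,1), (1,0,-1,1,-1,2), (1,0, 1,2,-1,1),
--     (-1,0,-1,1, 1,2), (-1,0,-1,2,-1,1), (-1,0, 1,1,-1,2), (-1,0, 1,2, 1,1),
--     (1,1,-1,0, 1,2), (1,1,-1,2,-1,0), (1,1, 1,0,-1,2), (1,1, 1,2, 1,0),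
--     (-1,1, 1,0, 1,2), (-1,1,-1,2, 1,0), (-1,1,-1,0,-1,2), (-1,1, 1,2,-1,0),
--     (1,2, 1,1,-1,0), (1,2, 1,0, 1,1), (1,2,-1,1, 1,0), (1,2,-1,0,-1,1),
--     (-1,2, 1,1, 1,0), (-1,2,-1,0, 1,1), (-1,2,-1,1,-1,0), (-1,2, 1,0,-1,1),
-- ]
--
-- def rot3(x, y, z):
--     v = (x, y, z)
--     for sa, ia, sb, ib, sc, ic in _TABLE:
--         yield sa * v[ia], sb * v[ib], sc * v[ic]
-- ===== Notes on version B (the rewrite author's own statement) =====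
-- stated objective: simpler
-- what changed: Replaced the two-level nested generator (6 axis blocks each expanding rot2's 4 yields) with a single loop over a precomputed flat table of 24 sign/axis-index transforms.
import Mathlib
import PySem

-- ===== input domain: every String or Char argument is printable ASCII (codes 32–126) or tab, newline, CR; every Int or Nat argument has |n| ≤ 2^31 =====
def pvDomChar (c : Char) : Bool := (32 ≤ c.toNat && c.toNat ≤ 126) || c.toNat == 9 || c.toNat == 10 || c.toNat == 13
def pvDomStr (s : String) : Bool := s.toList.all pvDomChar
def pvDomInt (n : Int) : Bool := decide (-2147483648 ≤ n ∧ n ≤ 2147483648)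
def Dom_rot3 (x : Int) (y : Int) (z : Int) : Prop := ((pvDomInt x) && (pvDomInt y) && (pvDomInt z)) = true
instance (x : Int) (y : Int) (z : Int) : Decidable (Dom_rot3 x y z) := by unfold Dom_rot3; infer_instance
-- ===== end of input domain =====

-- B replaces A's nested generators with one pass over a flat table of 24 sign/axis transforms (simpler decomposition, same cost).
-- ===== PORT A =====
-- rot2(y,z): yields (y,z),(-z,y),(-y,-z),(z,-y)
def rot2 (y : Int) (z : Int) : List (Int × Int) := [(y, z), (-z, y), (-y, -z), (z, -y)]

def rot3 (x : Int) (y : Int) (z : Int) : List (Int × Int × Int) :=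
  ((rot2 y z).map (fun p => (x, p.1, p.2))) ++
  ((rot2 (-y) z).map (fun p => (-x, p.1, p.2))) ++
  ((rot2 (-x) z).map (fun p => (y, p.1, p.2))) ++
  ((rot2 x z).map (fun p => (-y, p.1, p.2))) ++
  ((rot2 y (-x)).map (fun p => (z, p.1, p.2))) ++
  ((rot2 y x).map (fun p => (-z, p.1, p.2)))

-- ===== PORT B =====
-- the flat table _TABLE of Source B: (sign, axis index) for each of the three output coordinates
def rot3Table : List ((Int × Int) × (Int × Int) × (Int × Int)) :=
  [((1,0),(1,1),(1,2)), ((1,0),(-1,2),(1,1)), ((1,0),(-1,1),(-1,2)), ((1,0),(1,2),(-1,1)),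
   ((-1,0),(-1,1),(1,2)), ((-1,0),(-1,2),(-1,1)), ((-1,0),(1,1),(-1,2)), ((-1,0),(1,2),(1,1)),
   ((1,1),(-1,0),(1,2)), ((1,1),(-1,2),(-1,0)), ((1,1),(1,0),(-1,2)), ((1,1),(1,2),(1,0)),
   ((-1,1),(1,0),(1,2)), ((-1,1),(-1,2),(1,0)), ((-1,1),(-1,0),(-1,2)), ((-1,1),(1,2),(-1,0)),
   ((1,2),(1,1),(-1,0)), ((1,2),(1,0),(1,1)), ((1,2),(-1,1),(1,0)), ((1,2),(-1,0),(-1,1)),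
   ((-1,2),(1,1),(1,0)), ((-1,2),(-1,0),(1,1)), ((-1,2),(-1,1),(-1,0)), ((-1,2),(1,0),(-1,1))]

-- v[i] for the tuple v = (x,y,z); table indices are only 0,1,2
def rot3Pick (x : Int) (y : Int) (z : Int) (i : Int) : Int :=
  if i = 0 then x else if i = 1 then y else z

def rot3_alt (x : Int) (y : Int) (z : Int) : List (Int × Int × Int) :=
  rot3Table.map (fun t =>
    (t.1.1 * rot3Pick x y z t.1.2,
     t.2.1.1 * rot3Pick x y z t.2.1.2,
     t.2.2.1 * rot3Pick x y z t.2.2.2))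

-- ===== PRECONDITION & SPEC =====
def Spec_rot3 (x : Int) (y : Int) (z : Int) (out : List (Int × Int × Int)) : Prop := out = rot3_alt x y z
instance (x : Int) (y : Int) (z : Int) (out : List (Int × Int × Int)) : Decidable (Spec_rot3 x y z out) := by unfold Spec_rot3; infer_instance

-- ===== CLAIM (what is proved, stated in full; the proofs are below) =====
def Claim_equal_rot3 : Prop := ∀ (x : Int) (y : Int) (z : Int), Dom_rot3 x y z → Spec_rot3 x y z (rot3 x y z)

-- ===== LEMMAS AND PROOFS =====

-- ===== VERDICT (by name: the statement is the Claim_ definition above) =====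
theorem rot3_spec : Claim_equal_rot3 := by
  intro x y z _
  unfold Spec_rot3
  simp [rot3, rot3_alt, rot2, rot3Table, rot3Pick]
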